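-- pv_equiv track=rewrite | github.com/Gocrazy/LeetCode | 415_addstrings.py | addAmount
-- ===== SOURCE A (Python) =====
-- def addAmount(numbers):
--     total = 0
--     digital = 0
--     for number in reversed(numbers):
--         amount = int(number) * (10**digital)
--         total += amount
--         digital += 1
--     return total
-- ===== SOURCE B (Python) =====
-- def addAmount(numbers):
--     total = 0
--     for number in numbers:
--         total = total * 10 + int(number)
--     return total
-- ===== Notes on version B (the rewrite author's own statement) =====
-- stated objective: idiomatic
-- what changed: Replaces the reversed-order weighted sum with 10**digital by a forward Horner multiply-and-add accumulation with no exponentiation or position counter.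
import Mathlib
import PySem

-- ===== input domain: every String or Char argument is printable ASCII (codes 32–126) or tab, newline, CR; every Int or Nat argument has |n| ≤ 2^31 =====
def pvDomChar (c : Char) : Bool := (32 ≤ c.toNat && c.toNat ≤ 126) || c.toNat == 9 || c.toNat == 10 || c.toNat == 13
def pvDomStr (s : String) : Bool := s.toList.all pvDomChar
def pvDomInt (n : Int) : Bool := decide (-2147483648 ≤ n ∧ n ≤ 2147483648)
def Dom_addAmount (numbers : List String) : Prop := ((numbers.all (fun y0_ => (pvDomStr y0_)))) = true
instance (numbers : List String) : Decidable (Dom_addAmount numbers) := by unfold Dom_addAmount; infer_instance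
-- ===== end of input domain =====

-- B replaces the reversed weighted sum (10**digital per element) by a forward Horner
-- multiply-and-add accumulation; same result, no exponentiation or position counter.


-- ===== PORT A =====
-- loop body: amount = int(number) * 10**digital; total += amount; digital += 1
-- (int(number) raising ValueError = ofStr? none, excluded by Pre_; the none branch leaves the state)
def addAmountStep (st : Int × Nat) (number : String) : Int × Nat :=
  match PySem.Int.ofStr? number with
  | some v => (st.1 + v * (10 : Int) ^ st.2, st.2 + 1)
  | none => st

def addAmount (numbers : List String) : Int :=
  (numbers.reverse.foldl addAmountStep (0, 0)).1

-- ===== PORT B =====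
-- forward Horner: total = total * 10 + int(number)
def addAmount_alt (numbers : List String) : Int :=
  numbers.foldl (fun total number => total * 10 + (PySem.Int.ofStr? number).getD 0) 0

-- ===== PRECONDITION & SPEC =====
-- Pre_ excludes exactly the inputs where Python's int(number) raises ValueError.
def Pre_addAmount (numbers : List String) : Prop :=
  ∀ n ∈ numbers, (PySem.Int.ofStr? n).isSome
instance (numbers : List String) : Decidable (Pre_addAmount numbers) := by
  unfold Pre_addAmount; infer_instance

def pvWitness_addAmount : List String := ["12", " +5 ", "-3"]

def Spec_addAmount (numbers : List String) (out : Int) : Prop := out = addAmount_alt numbers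
instance (numbers : List String) (out : Int) : Decidable (Spec_addAmount numbers out) := by unfold Spec_addAmount; infer_instance

-- ===== CLAIM (what is proved, stated in full; the proofs are below) =====
def Claim_equal_addAmount : Prop := ∀ (numbers : List String), Dom_addAmount numbers → Pre_addAmount numbers → Spec_addAmount numbers (addAmount numbers)

-- ===== LEMMAS AND PROOFS =====

-- Horner fold with a general accumulator
lemma horner_general (l : List String) (a : Int) :
    l.foldl (fun total number => total * 10 + (PySem.Int.ofStr? number).getD 0) a
      = a * (10 : Int) ^ l.length + addAmount_alt l := by
  induction l generalizing a with
  | nil => simp [addAmount_alt]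
  | cons x xs ih =>
    simp only [List.foldl_cons, List.length_cons, addAmount_alt]
    rw [ih, ih ((0:Int) * 10 + (PySem.Int.ofStr? x).getD 0)]
    ring

-- A's reversed fold from state (t, d) computes t + Horner(l) * 10^d, with counter d + |l|.
lemma foldA_eq (l : List String) (h : ∀ n ∈ l, (PySem.Int.ofStr? n).isSome) (t : Int) (d : Nat) :
    l.reverse.foldl addAmountStep (t, d)
      = (t + addAmount_alt l * (10 : Int) ^ d, d + l.length) := by
  induction l generalizing t d with
  | nil => simp [addAmount_alt]
  | cons x xs ih =>
    have hx : (PySem.Int.ofStr? x).isSome := h x (List.mem_cons_self ..)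
    obtain ⟨v, hv⟩ := Option.isSome_iff_exists.mp hx
    have hxs : ∀ n ∈ xs, (PySem.Int.ofStr? n).isSome := fun n hn => h n (List.mem_cons_of_mem _ hn)
    simp only [List.reverse_cons, List.foldl_append, List.foldl_cons, List.foldl_nil]
    rw [ih hxs]
    simp only [addAmountStep, hv, addAmount_alt, List.foldl_cons]
    rw [horner_general xs ((0:Int) * 10 + (Option.some v).getD 0)]
    simp only [Option.getD_some, Prod.mk.injEq, List.length_cons]
    constructor
    · unfold addAmount_alt; ring
    · omega

-- ===== VERDICT (by name: the statement is the Claim_ definition above) =====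
theorem addAmount_spec : Claim_equal_addAmount := by
  intro numbers _ hpre
  unfold Spec_addAmount addAmount
  rw [foldA_eq numbers hpre 0 0]
  simp
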